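-- pv_equiv track=rewrite | github.com/opencog/language-learning | src/parse_evaluator/parse_evaluator.py | Get_Parses
-- ===== SOURCE A (Python) =====
-- def Get_Parses(data):
--     """
--         Reads parses from data, counting number of parses by newlines
--         - sentences: list with tokenized sentences in data
--         - parses: a list of lists containing the split links of each parse
--         [
--           [[link1-parse1][link2-parse1] ... ]
--           [[link1-parse2][link2-parse2] ... ]
--           ...
--         ]
--         Each list is splitted into tokens using space.
--     """
--     parses = []
--     sentences = []
--     parse_num = -1
--     new_flag = True
--     for line in data:
--         if line == "\n":
--             # get rid of sentences with no links
--             new_flag = True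
--             continue
--         if new_flag:
--             new_flag = False
--             curr_sent = line.split()
--             if curr_sent[0] == "###LEFT-WALL###":
--                 curr_sent.pop(0)
--             sentences.append(curr_sent)
--             parses.append([])
--             parse_num += 1
--             continue
--         parses[parse_num].append(line.split())
--
--     return parses, sentences
-- ===== SOURCE B (Python) =====
-- def Get_Parses(data):
--     """Same result as A: partition into blank-separated blocks first, then build both lists per block."""
--     blocks = []
--     cur = []
--     for line in data:
--         if line == "\n":
--             if cur:
--                 blocks.append(cur)
--                 cur = []
--         else:
--             cur.append(line)
--     if cur:
--         blocks.append(cur)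
--     sentences = []
--     parses = []
--     for block in blocks:
--         toks = block[0].split()
--         if toks[0] == "###LEFT-WALL###":
--             toks = toks[1:]
--         sentences.append(toks)
--         parses.append([l.split() for l in block[1:]])
--     return parses, sentences
-- ===== Notes on version B (the rewrite author's own statement) =====
-- stated objective: simpler
-- what changed: Replaces A's single stateful loop (new_flag, parse_num, in-place append at parses[parse_num]) by a two-phase decomposition: first partition the lines into blank-separated blocks, then build sentences from each block head and parses from each block tail.
import Mathlib
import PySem

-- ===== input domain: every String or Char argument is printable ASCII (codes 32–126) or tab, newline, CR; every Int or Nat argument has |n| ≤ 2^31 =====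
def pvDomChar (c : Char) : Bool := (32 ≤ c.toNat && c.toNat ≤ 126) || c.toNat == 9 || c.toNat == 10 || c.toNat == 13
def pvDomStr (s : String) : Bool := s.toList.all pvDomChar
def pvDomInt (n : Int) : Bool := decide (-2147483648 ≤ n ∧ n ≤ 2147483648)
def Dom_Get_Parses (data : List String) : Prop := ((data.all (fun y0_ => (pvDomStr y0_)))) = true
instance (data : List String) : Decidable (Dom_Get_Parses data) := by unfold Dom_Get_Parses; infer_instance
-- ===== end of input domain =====

-- B replaces A's single stateful loop by: split into blank-separated blocks, then map over blocks (objective: simpler).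

-- ===== PORT A =====
-- Python list indexing with assignment target parses[parse_num]: negative index wraps, out of
-- range is IndexError; in A's loop the index is always the last element, so the out-of-range
-- branch (returned unchanged here) is unreachable.
def pvModifyAt {α : Type} (xs : List α) (i : Int) (f : α → α) : List α :=
  let j : Int := if i < 0 then i + xs.length else i
  if 0 ≤ j ∧ j < xs.length then xs.modify j.toNat f else xs

-- state: (parses, sentences, parse_num, new_flag)
def pvStepA (st : List (List (List String)) × List (List String) × Int × Bool) (line : String) :
    List (List (List String)) × List (List String) × Int × Bool :=
  let (parses, sentences, parse_num, new_flag) := st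
  if line = "\n" then (parses, sentences, parse_num, true)
  else if new_flag then
    let curr_sent := PySem.Str.split₀ line
    -- curr_sent[0]: IndexError when the split is empty — excluded by Pre_Get_Parses
    let curr_sent :=
      if PySem.List.pyGet? curr_sent 0 = some "###LEFT-WALL###" then curr_sent.drop 1 else curr_sent
    (parses ++ [[]], sentences ++ [curr_sent], parse_num + 1, false)
  else
    (pvModifyAt parses parse_num (fun p => p ++ [PySem.Str.split₀ line]), sentences, parse_num, new_flag)

def Get_Parses (data : List String) : List (List (List String)) × List (List String) :=
  let st := data.foldl pvStepA ([], [], -1, true)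
  (st.1, st.2.1)

-- ===== PORT B =====
def pvSentOf (b : List String) : List String :=
  match b with
  | [] => []   -- blocks are nonempty by construction; Source B raises only when the split is empty (excluded by Pre_)
  | x :: _ =>
    let toks := PySem.Str.split₀ x
    if PySem.List.pyGet? toks 0 = some "###LEFT-WALL###" then toks.drop 1 else toks

def pvParseOf (b : List String) : List (List String) :=
  (b.drop 1).map PySem.Str.split₀

def pvStepB (st : List (List String) × List String) (line : String) :
    List (List String) × List String :=
  if line = "\n" then (if st.2 = [] then st else (st.1 ++ [st.2], []))
  else (st.1, st.2 ++ [line])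

def Get_Parses_alt (data : List String) : List (List (List String)) × List (List String) :=
  let st := data.foldl pvStepB ([], [])
  let blocks := if st.2 = [] then st.1 else st.1 ++ [st.2]
  (blocks.map pvParseOf, blocks.map pvSentOf)

-- ===== PRECONDITION & SPEC =====
-- Pre_ excludes inputs on which Python A (and B alike) raises IndexError: a line that starts a
-- block (non-"\n" line at position 0 or right after a "\n") but consists only of whitespace,
-- so its .split() is empty and curr_sent[0] fails.
def Pre_Get_Parses (data : List String) : Prop :=
  ∀ i : Nat, i < data.length → data[i]! ≠ "\n" → (i = 0 ∨ data[i-1]! = "\n") →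
    PySem.Str.split₀ data[i]! ≠ []
instance (data : List String) : Decidable (Pre_Get_Parses data) := by
  unfold Pre_Get_Parses; infer_instance

def pvWitness_Get_Parses : List String := ["###LEFT-WALL### a b\n", "0 1 a\n", "\n", "c d\n"]

def Spec_Get_Parses (data : List String) (out : List (List (List String)) × List (List String)) : Prop := out = Get_Parses_alt data
instance (data : List String) (out : List (List (List String)) × List (List String)) : Decidable (Spec_Get_Parses data out) := by unfold Spec_Get_Parses; infer_instance

-- ===== CLAIM (what is proved, stated in full; the proofs are below) =====
def Claim_equal_Get_Parses : Prop := ∀ (data : List String), Dom_Get_Parses data → Pre_Get_Parses data → Spec_Get_Parses data (Get_Parses data)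

-- ===== LEMMAS AND PROOFS =====

-- glue the finished blocks with the unfinished current block
def pvGlue (bs : List (List String)) (cur : List String) : List (List String) :=
  if cur = [] then bs else bs ++ [cur]

def pvStA (bs : List (List String)) (cur : List String) :
    List (List (List String)) × List (List String) × Int × Bool :=
  ((pvGlue bs cur).map pvParseOf, (pvGlue bs cur).map pvSentOf,
    ((pvGlue bs cur).length : Int) - 1, decide (cur = []))

theorem pvModifyAt_last {α : Type} (xs : List α) (a : α) (f : α → α) :
    pvModifyAt (xs ++ [a]) (xs.length) f = xs ++ [f a] := by
  unfold pvModifyAt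
  have h : ¬ ((xs.length : Int) < 0) := by omega
  simp only [if_neg h, List.length_append, List.length_cons, List.length_nil]
  rw [if_pos (by omega)]
  simp only [Int.toNat_natCast]
  induction xs with
  | nil => simp [List.modify]
  | cons x xs ih => simpa [List.modify] using ih

theorem pv_key (data : List String) (bs : List (List String)) (cur : List String) :
    data.foldl pvStepA (pvStA bs cur)
      = pvStA (data.foldl pvStepB (bs, cur)).1 (data.foldl pvStepB (bs, cur)).2 := by
  induction data generalizing bs cur with
  | nil => rfl
  | cons line rest ih =>
    simp only [List.foldl_cons]
    have hstep : pvStepA (pvStA bs cur) line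
        = pvStA (pvStepB (bs, cur) line).1 (pvStepB (bs, cur) line).2 := by
      by_cases hline : line = "\n"
      · by_cases hcur : cur = [] <;>
          simp [pvStepA, pvStepB, pvStA, pvGlue, hline, hcur]
      · by_cases hcur : cur = []
        · subst hcur
          simp [pvStepA, pvStepB, pvStA, pvGlue, pvParseOf, pvSentOf, hline]
        · have hglue : pvGlue bs cur = bs ++ [cur] := by simp [pvGlue, hcur]
          have hglue' : pvGlue bs (cur ++ [line]) = bs ++ [cur ++ [line]] := by
            simp [pvGlue]
          have hsent : pvSentOf (cur ++ [line]) = pvSentOf cur := by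
            cases cur with
            | nil => exact absurd rfl hcur
            | cons x xs => simp [pvSentOf]
          have hpar : pvParseOf (cur ++ [line]) = pvParseOf cur ++ [PySem.Str.split₀ line] := by
            cases cur with
            | nil => exact absurd rfl hcur
            | cons x xs => simp [pvParseOf]
          have hmod : pvModifyAt (bs.map pvParseOf ++ [pvParseOf cur]) (bs.length : Int)
              (fun p => p ++ [PySem.Str.split₀ line])
              = bs.map pvParseOf ++ [pvParseOf cur ++ [PySem.Str.split₀ line]] := by
            simpa using pvModifyAt_last (bs.map pvParseOf) (pvParseOf cur)
              (fun p => p ++ [PySem.Str.split₀ line])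
          simp [pvStepA, pvStepB, pvStA, hglue, hglue', hline, hcur, hmod, hsent, hpar]
    rw [hstep, ih]

-- ===== VERDICT (by name: the statement is the Claim_ definition above) =====
theorem Get_Parses_spec : Claim_equal_Get_Parses := by
  intro data _ _
  show Get_Parses data = Get_Parses_alt data
  unfold Get_Parses Get_Parses_alt
  have h0 : (([], [], -1, true) : List (List (List String)) × List (List String) × Int × Bool)
      = pvStA [] [] := by simp [pvStA, pvGlue]
  rw [h0, pv_key]
  simp [pvStA, pvGlue]
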